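-- pv_equiv track=rewrite | github.com/Bro-o/coding-practice | 자료구조/트리/힙/더맵게.py | solution
-- ===== SOURCE A (Python) =====
-- import heapq
--
-- def solution(scoville: list[int], K: int) -> int:
--     answer: int = 0
--     s: list[int] = scoville[:]
--     heapq.heapify(s)
--     while s and s[0] < K:
--         try:
--             new_food = heapq.heappop(s) + heapq.heappop(s) * 2
--             heapq.heappush(s, new_food)
--             answer += 1
--         except:
--             return -1
--     return answer
-- ===== SOURCE B (Python) =====
-- def solution(scoville, K):
--     # reverse-sorted working list instead of a heap: the two smallest foods are
--     # always at the tail; each merged value goes back in by binary-searched insertion.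
--     s = sorted(scoville, reverse=True)
--     count = 0
--     while s and s[-1] < K:
--         if len(s) == 1:
--             return -1
--         x = s.pop()
--         y = s.pop()
--         new = x + 2 * y
--         lo, hi = 0, len(s)
--         while lo < hi:
--             mid = (lo + hi) // 2
--             if s[mid] >= new:
--                 lo = mid + 1
--             else:
--                 hi = mid
--         s.insert(lo, new)
--         count += 1
--     return count
-- ===== Notes on version B (the rewrite author's own statement) =====
-- stated objective: alternative
-- what changed: Replaces the binary heap with a reverse-sorted list kept sorted by binary-searched insertion of each merged value, popping the two minima off the tail instead of heap-popping.
import Mathlib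
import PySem

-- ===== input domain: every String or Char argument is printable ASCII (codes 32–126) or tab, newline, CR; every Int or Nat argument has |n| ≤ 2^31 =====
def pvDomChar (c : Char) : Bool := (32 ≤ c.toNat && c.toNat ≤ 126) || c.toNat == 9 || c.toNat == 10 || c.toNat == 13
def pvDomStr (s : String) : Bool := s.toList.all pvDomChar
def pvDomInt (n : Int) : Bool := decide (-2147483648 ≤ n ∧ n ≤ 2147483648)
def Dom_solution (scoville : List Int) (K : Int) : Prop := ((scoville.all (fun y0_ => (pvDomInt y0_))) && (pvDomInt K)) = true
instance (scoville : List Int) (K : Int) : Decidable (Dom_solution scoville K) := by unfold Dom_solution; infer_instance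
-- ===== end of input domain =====

-- B replaces A's binary heap by a reverse-sorted list kept sorted with binary-searched
-- insertion (alternative decomposition, not claimed faster). A mutates only its private
-- copy of the input.

-- ===== PORT A =====
-- A's heap is ported through the heapq contract: the heap holds a multiset, s[0]/heappop
-- observe and remove the smallest element (PySem.List.min? = the min, List.erase = remove
-- one occurrence), heappush adds an element.  Fuel = list length (each merge shrinks it).
def solGoA (K : Int) : Nat → List Int → Int → Int
  | 0, _, answer => answer
  | f + 1, s, answer =>
    match PySem.List.min? s (fun x => x) with
    | none => answer                                   -- while condition: s is empty
    | some m =>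
      if m < K then
        let s1 := s.erase m                            -- first heappop
        match PySem.List.min? s1 (fun x => x) with
        | none => (-1 : Int)                           -- second heappop raises IndexError
        | some m2 =>
            solGoA K f (s1.erase m2 ++ [m + m2 * 2]) (answer + 1)  -- heappush new_food
      else answer

def solution (scoville : List Int) (K : Int) : Int :=
  solGoA K scoville.length scoville 0

-- ===== PORT B =====
-- B's hand-written lo/hi loop, transliterated: while lo < hi, mid = (lo+hi)//2,
-- go right iff s[mid] >= new.  s[mid] is in range whenever lo < hi ≤ len s, so the
-- getD default is never used; fuel (hi-lo shrinks each pass) only makes it total.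
def bsDesc (s : List Int) (new : Int) : Nat → Nat → Nat → Nat
  | 0, lo, _ => lo
  | fuel + 1, lo, hi =>
    if lo < hi then
      let mid := (lo + hi) / 2
      if new ≤ s.getD mid 0 then bsDesc s new fuel (mid + 1) hi
      else bsDesc s new fuel lo mid
    else lo

-- the loop: s[-1]/pop() work at the tail of the reverse-sorted list; insert(lo, new)
-- is PySem.List.insert.  Fuel = list length (each merge shrinks it).
def solGoB (K : Int) : Nat → List Int → Int → Int
  | 0, _, count => count
  | f + 1, s, count =>
    match s.getLast? with                              -- while s and s[-1] < K
    | none => count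
    | some x =>
      if x < K then
        if s.length = 1 then (-1 : Int)
        else
          let s1 := s.dropLast                         -- x = s.pop()
          let y := s1.getLast?.getD 0                  -- y = s.pop(); nonempty here
          let s2 := s1.dropLast
          let new := x + 2 * y
          let lo := bsDesc s2 new (s2.length + 1) 0 s2.length
          solGoB K f (PySem.List.insert s2 (lo : Int) new) (count + 1)
      else count

def solution_alt (scoville : List Int) (K : Int) : Int :=
  solGoB K scoville.length (PySem.List.sorted scoville (fun x => x) true) 0

-- ===== PRECONDITION & SPEC =====
def Spec_solution (scoville : List Int) (K : Int) (out : Int) : Prop := out = solution_alt scoville K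
instance (scoville : List Int) (K : Int) (out : Int) : Decidable (Spec_solution scoville K out) := by unfold Spec_solution; infer_instance

-- ===== CLAIM (what is proved, stated in full; the proofs are below) =====
def Claim_equal_solution : Prop := ∀ (scoville : List Int) (K : Int), Dom_solution scoville K → Spec_solution scoville K (solution scoville K)

-- ===== LEMMAS AND PROOFS =====

-- On a multiset, min? returns the head of any sorted arrangement.
theorem min?_eq_head_of_perm_sorted (s t : List Int) (p : s.Perm t)
    (hs : List.Pairwise (· ≤ ·) t) :
    PySem.List.min? s (fun x => x) = t.head? := by
  cases t with
  | nil =>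
    have : s = [] := p.eq_nil
    simp [this, PySem.List.min?]
  | cons x r =>
    cases h : PySem.List.min? s (fun x => x) with
    | none =>
      have : s = [] := (PySem.List.min?_eq_none_iff s (fun x => x)).mp h
      subst this
      exact absurd p.symm.eq_nil (by simp)
    | some m =>
      have hmem : m ∈ s := PySem.List.min?_mem h
      have hmin : ∀ y ∈ s, m ≤ y := by
        intro y hy
        simpa using PySem.List.min?_isMin h y hy
      have hxlem : x ≤ m := by
        have : m ∈ x :: r := p.mem_iff.mp hmem
        rcases List.mem_cons.mp this with h1 | h1
        · exact le_of_eq h1.symm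
        · exact (List.pairwise_cons.mp hs).1 m h1
      have hmlex : m ≤ x := hmin x (p.mem_iff.mpr (by simp))
      simp [le_antisymm hmlex hxlem]

-- the binary-search loop on a reverse-sorted list lands on the boundary between
-- the prefix ≥ new and the suffix < new.
theorem bsDesc_spec (s : List Int) (new : Int)
    (hs : List.Pairwise (fun a b => b ≤ a) s) :
    ∀ (fuel lo hi : Nat), lo ≤ hi → hi ≤ s.length → hi - lo ≤ fuel →
      (∀ (j : Nat) (hj : j < s.length), j < lo → new ≤ s[j]) →
      (∀ (j : Nat) (hj : j < s.length), hi ≤ j → s[j] < new) →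
      bsDesc s new fuel lo hi ≤ s.length ∧
      (∀ (j : Nat) (hj : j < s.length), j < bsDesc s new fuel lo hi → new ≤ s[j]) ∧
      (∀ (j : Nat) (hj : j < s.length), bsDesc s new fuel lo hi ≤ j → s[j] < new) := by
  have hmono : ∀ (i j : Nat) (hi : i < s.length) (hj : j < s.length), i < j → s[j] ≤ s[i] :=
    fun i j hi hj hij => (List.pairwise_iff_getElem.mp hs) i j hi hj hij
  intro fuel
  induction fuel with
  | zero =>
    intro lo hi hlohi hhile hfuel hlt hge
    have : lo = hi := by omega
    subst this
    simp only [bsDesc]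
    exact ⟨by omega, hlt, fun j hj h => hge j hj h⟩
  | succ fuel ih =>
    intro lo hi hlohi hhile hfuel hlt hge
    by_cases hcmp : lo < hi
    · have hmidlo : lo ≤ (lo + hi) / 2 := by omega
      have hmidhi : (lo + hi) / 2 < hi := by omega
      have hmlen : (lo + hi) / 2 < s.length := by omega
      rw [bsDesc, if_pos hcmp]
      simp only [List.getD_eq_getElem s 0 hmlen]
      by_cases hc : new ≤ s[(lo + hi) / 2]
      · rw [if_pos hc]
        refine ih ((lo + hi) / 2 + 1) hi (by omega) hhile (by omega) ?_ hge
        intro j hj hjlt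
        by_cases hjlo : j < lo
        · exact hlt j hj hjlo
        · rcases Nat.lt_or_ge j ((lo + hi) / 2) with h | h
          · exact le_trans hc (hmono j ((lo + hi) / 2) hj hmlen h)
          · have : j = (lo + hi) / 2 := by omega
            subst this; exact hc
      · rw [if_neg hc]
        refine ih lo ((lo + hi) / 2) (by omega) (by omega) (by omega) hlt ?_
        intro j hj hjge
        rcases Nat.lt_or_ge ((lo + hi) / 2) j with h | h
        · exact lt_of_le_of_lt (hmono ((lo + hi) / 2) j hmlen hj h) (not_le.mp hc)
        · have : j = (lo + hi) / 2 := by omega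
          subst this; exact not_le.mp hc
    · rw [bsDesc, if_neg hcmp]
      have : lo = hi := by omega
      subst this
      exact ⟨by omega, hlt, fun j hj h => hge j hj h⟩

-- list.insert at an in-range non-negative position is take/drop splicing.
theorem pyInsert_eq_take_drop (l : List Int) (p : Nat) (hp : p ≤ l.length) (v : Int) :
    PySem.List.insert l (p : Int) v = l.take p ++ v :: l.drop p := by
  have h : (min (p : Int) (l.length : Int)).toNat = p := by omega
  simp [PySem.List.insert, PySem.List.sliceIndices]
  rw [if_neg (by omega : ¬ (p : Int) < 0), h]

-- splicing v at the ≥/< boundary keeps the list reverse-sorted.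
theorem desc_splice_sorted (v : Int) :
    ∀ (l : List Int) (p : Nat), p ≤ l.length →
      List.Pairwise (fun a b => b ≤ a) l →
      (∀ (j : Nat) (hj : j < l.length), j < p → v ≤ l[j]) →
      (∀ (j : Nat) (hj : j < l.length), p ≤ j → l[j] < v) →
      List.Pairwise (fun a b => b ≤ a) (l.take p ++ v :: l.drop p) := by
  intro l
  induction l with
  | nil =>
    intro p hp _ _ _
    have h0 : p = 0 := by simpa using hp
    subst h0
    simp
  | cons a t ih =>
    intro p hp hl hlt hge
    cases p with
    | zero =>
      have hav : a < v := hge 0 (by simp) (Nat.zero_le _)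
      refine List.Pairwise.cons ?_ hl
      intro b hb
      rcases List.mem_cons.mp hb with rfl | hb
      · exact le_of_lt hav
      · exact le_trans (List.rel_of_pairwise_cons hl hb) (le_of_lt hav)
    | succ q =>
      have hva : v ≤ a := hlt 0 (by simp) (Nat.succ_pos _)
      simp only [List.take_succ_cons, List.drop_succ_cons, List.cons_append]
      refine List.Pairwise.cons ?_ ?_
      · intro b hb
        rcases List.mem_append.mp hb with hb | hb
        · exact List.rel_of_pairwise_cons hl (List.mem_of_mem_take hb)
        · rcases List.mem_cons.mp hb with rfl | hb
          · exact hva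
          · exact List.rel_of_pairwise_cons hl (List.mem_of_mem_drop hb)
      · exact ih q (by simpa using hp) (List.Pairwise.of_cons hl)
          (fun j hj h => by simpa using hlt (j + 1) (by simpa using hj) (by omega))
          (fun j hj h => by simpa using hge (j + 1) (by simpa using hj) (by omega))

theorem go_eq (K : Int) : ∀ (f : Nat) (s t : List Int) (acc : Int),
    s.Perm t → List.Pairwise (fun a b => b ≤ a) t → solGoA K f s acc = solGoB K f t acc := by
  intro f
  induction f with
  | zero => intro s t acc _ _; rfl
  | succ f ih =>
    intro s t acc p ht
    rcases t.eq_nil_or_concat with rfl | ⟨d, x, rfl⟩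
    · have hsnil : s = [] := p.eq_nil
      simp [solGoA, solGoB, hsnil, PySem.List.min?]
    · -- t = d ++ [x]; x is the minimum
      simp only [List.concat_eq_append] at p ht ⊢
      have hrevsort : List.Pairwise (· ≤ ·) (x :: d.reverse) := by
        have := (List.pairwise_reverse).mpr ht
        simpa using this
      have hperm : s.Perm (x :: d.reverse) := by
        refine p.trans ?_
        refine ((d ++ [x]).reverse_perm.symm).trans ?_
        simp
      have hmin1 : PySem.List.min? s (fun x => x) = some x := by
        simpa using min?_eq_head_of_perm_sorted s (x :: d.reverse) hperm hrevsort
      have p1 : (s.erase x).Perm d := by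
        have : s.Perm (x :: d) := hperm.trans ((d.reverse_perm).cons x)
        have := this.erase x
        simpa [List.erase_cons_head] using this
      by_cases hK : x < K
      · rcases d.eq_nil_or_concat with rfl | ⟨d2, y, rfl⟩
        · -- only one food left
          have h0 : s.erase x = [] := p1.eq_nil
          simp only [solGoA, solGoB, hmin1, h0, List.nil_append]
          simp [hK, PySem.List.min?]
        · -- at least two: x, y are the two minima
          simp only [List.concat_eq_append] at p ht p1 hmin1 ⊢
          have htd : List.Pairwise (fun a b => b ≤ a) (d2 ++ [y]) := by
            refine List.Pairwise.sublist ?_ ht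
            exact List.sublist_append_left _ _
          have hd2 : List.Pairwise (fun a b => b ≤ a) d2 := by
            refine List.Pairwise.sublist ?_ htd
            exact List.sublist_append_left _ _
          have hrevsort2 : List.Pairwise (· ≤ ·) (y :: d2.reverse) := by
            have := (List.pairwise_reverse).mpr htd
            simpa using this
          have hperm2 : (s.erase x).Perm (y :: d2.reverse) := by
            refine p1.trans ?_
            refine ((d2 ++ [y]).reverse_perm.symm).trans ?_
            simp
          have hmin2 : PySem.List.min? (s.erase x) (fun x => x) = some y := by
            simpa using min?_eq_head_of_perm_sorted (s.erase x) (y :: d2.reverse) hperm2 hrevsort2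
          have p2 : ((s.erase x).erase y).Perm d2 := by
            have : (s.erase x).Perm (y :: d2) := hperm2.trans ((d2.reverse_perm).cons y)
            have := this.erase y
            simpa [List.erase_cons_head] using this
          have hlen1 : ¬ (d2 ++ [y] ++ [x]).length = 1 := by
            simp
          have hspec := bsDesc_spec d2 (x + 2 * y) hd2 (d2.length + 1) 0 d2.length
            (by omega) (le_refl _) (by omega)
            (by intro j hj h; omega) (by intro j hj h; omega)
          obtain ⟨hle, hge', hlt'⟩ := hspec
          have hsplice := pyInsert_eq_take_drop d2 (bsDesc d2 (x + 2 * y) (d2.length + 1) 0 d2.length) hle (x + 2 * y)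
          have hsorted' := desc_splice_sorted (x + 2 * y) d2 _ hle hd2 hge' hlt'
          have pnew : (((s.erase x).erase y) ++ [x + y * 2]).Perm
              (PySem.List.insert d2 ((bsDesc d2 (x + 2 * y) (d2.length + 1) 0 d2.length : Nat) : Int) (x + 2 * y)) := by
            rw [show x + y * 2 = x + 2 * y from by ring, hsplice]
            have h1 : (((s.erase x).erase y) ++ [x + 2 * y]).Perm ((x + 2 * y) :: d2) :=
              (List.perm_append_singleton _ _).trans (p2.cons _)
            refine h1.trans ?_
            have hm := List.perm_middle (a := x + 2 * y)
              (l₁ := List.take (bsDesc d2 (x + 2 * y) (d2.length + 1) 0 d2.length) d2)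
              (l₂ := List.drop (bsDesc d2 (x + 2 * y) (d2.length + 1) 0 d2.length) d2)
            rw [List.take_append_drop] at hm
            exact hm.symm
          rw [← hsplice] at hsorted'
          simp only [solGoA, solGoB, hmin1, hmin2, List.getLast?_concat, List.dropLast_concat,
            Option.getD_some]
          rw [if_pos hK, if_pos hK, if_neg hlen1]
          exact ih _ _ _ pnew hsorted'
      · simp only [solGoA, solGoB, hmin1, List.getLast?_concat]
        rw [if_neg hK, if_neg hK]

-- ===== VERDICT (by name: the statement is the Claim_ definition above) =====
theorem solution_spec : Claim_equal_solution := by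
  intro scoville K _
  unfold Spec_solution solution solution_alt
  have hlen : (PySem.List.sorted scoville (fun x => x) true).length = scoville.length :=
    PySem.List.length_sorted scoville (fun x => x) true
  rw [← hlen]
  exact go_eq K _ _ _ 0 (PySem.List.sorted_perm scoville (fun x => x) true).symm
    (by simpa using PySem.List.sorted_pairwise_rev scoville (fun x => x))
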